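-- pv_equiv track=rewrite | github.com/marcuspeh/leetcode-solutions | 1254-number-of-closed-islands/1254-number-of-closed-islands.py | checkIsClosed
-- ===== SOURCE A (Python) =====
-- def checkIsClosed(grid, r, c):
--     frontier = [(r, c)]
--     moves = [(1, 0), (-1, 0), (0, 1), (0, -1)]
--     isSurrounded = True
--
--     while frontier:
--         row, col = frontier.pop()
--         if grid[row][col] != 0:
--             continue
--         grid[row][col] = 2
--
--         for i, j in moves:
--             newRow = row + i
--             newCol = col + j
--
--             if newRow < 0 or newRow >= len(grid):
--                 isSurrounded = False
--                 continue
--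
--             if newCol < 0 or newCol >= len(grid[newRow]):
--                 isSurrounded = False
--                 continue
--             frontier.append((newRow, newCol))
--
--     return isSurrounded
-- ===== SOURCE B (Python) =====
-- def checkIsClosed(grid, r, c):
--     if grid[r][c] != 0:
--         return True
--
--     def dfs(row, col):
--         grid[row][col] = 2
--         surrounded = True
--         for i, j in ((0, -1), (0, 1), (-1, 0), (1, 0)):
--             nr, nc = row + i, col + j
--             if not (0 <= nr < len(grid) and 0 <= nc < len(grid[nr])):
--                 surrounded = False
--             elif grid[nr][nc] == 0:
--                 surrounded = dfs(nr, nc) and surrounded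
--         return surrounded
--
--     return dfs(r, c)
-- ===== Notes on version B (the rewrite author's own statement) =====
-- stated objective: alternative
-- what changed: A's explicit-stack worklist flood fill (pop, re-check cell, push all in-bounds neighbours) is replaced by a recursive DFS helper that marks a cell, recurses directly into in-bounds 0-neighbours, and ANDs the 'surrounded' results without short-circuiting; the start-cell != 0 early return is kept at top level.
import Mathlib
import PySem

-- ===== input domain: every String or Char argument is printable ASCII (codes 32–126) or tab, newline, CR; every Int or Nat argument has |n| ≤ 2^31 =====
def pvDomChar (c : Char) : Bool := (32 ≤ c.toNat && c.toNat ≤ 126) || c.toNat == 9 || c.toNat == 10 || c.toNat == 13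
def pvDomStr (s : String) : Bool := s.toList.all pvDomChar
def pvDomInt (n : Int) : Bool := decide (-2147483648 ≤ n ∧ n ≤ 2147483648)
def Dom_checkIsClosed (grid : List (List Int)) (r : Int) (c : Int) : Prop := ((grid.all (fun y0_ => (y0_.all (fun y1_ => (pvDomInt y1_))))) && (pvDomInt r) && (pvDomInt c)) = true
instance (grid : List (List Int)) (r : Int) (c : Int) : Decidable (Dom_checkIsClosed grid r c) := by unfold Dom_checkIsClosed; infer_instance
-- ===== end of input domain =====

-- B replaces A's explicit-stack flood fill by a recursive DFS helper (different decomposition,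
-- same cost); both A and B mutate `grid` in place identically (marking the component with 2) —
-- only the RETURN value is proved equal here.

-- Shared indexing helpers (Python grid[r][c] read / write, with Python's negative-index rule).
def pvGet2 (g : List (List Int)) (r c : Int) : Option Int :=
  (PySem.List.pyGet? g r).bind (fun row => PySem.List.pyGet? row c)

def pvSet2 (g : List (List Int)) (r c : Int) (v : Int) : List (List Int) :=
  PySem.List.pySetD g r (PySem.List.pySetD (PySem.List.pyGetD g r []) c v)

-- number of 0-cells (termination measure only)
def pvCz (g : List (List Int)) : Nat := (g.map (fun row => row.count 0)).sum

lemma pvIdxLt (len : Nat) (i : Int) (n : Nat) (h : PySem.List.pyIdx? len i = some n) :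
    n < len := by
  unfold PySem.List.pyIdx? at h
  split_ifs at h <;> simp_all <;> omega

-- pyGet? success gives one canonical Nat index shared by read and write
lemma pvIdxElim {α : Type} (xs : List α) (i : Int) (x : α)
    (h : PySem.List.pyGet? xs i = some x) :
    ∃ n : Nat, n < xs.length ∧ xs[n]? = some x ∧
      (∀ v : α, PySem.List.pySetD xs i v = xs.set n v) ∧
      (∀ d : α, PySem.List.pyGetD xs i d = x) := by
  unfold PySem.List.pyGet? at h
  cases hidx : PySem.List.pyIdx? xs.length i with
  | none => rw [hidx] at h; simp at h
  | some n =>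
    rw [hidx] at h
    simp only [Option.bind_some] at h
    refine ⟨n, pvIdxLt _ _ _ hidx, h, ?_, ?_⟩
    · intro v
      unfold PySem.List.pySetD PySem.List.pySet?
      rw [hidx]; rfl
    · intro d
      unfold PySem.List.pyGetD PySem.List.pyGet?
      rw [hidx]; simp [h]

lemma pvCountSetTwoLt (row : List Int) (m : Nat) (hm : row[m]? = some 0) :
    ((row.set m 2).count 0 < row.count 0) := by
  have hlt : m < row.length := (List.getElem?_eq_some_iff.mp hm).1
  have hv : row[m] = 0 := (List.getElem?_eq_some_iff.mp hm).2
  have hpos : 0 < row.count 0 :=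
    List.count_pos_iff.mpr (hv ▸ List.getElem_mem hlt)
  rw [List.count_set hlt]
  simp only [hv]
  split_ifs <;> simp_all

lemma pvCzSetAux (g : List (List Int)) (n : Nat) (row' : List Int) (hn : n < g.length) :
    pvCz (g.set n row') + (g[n]).count 0 = pvCz g + row'.count 0 := by
  unfold pvCz
  rw [List.map_set, List.sum_set]
  conv_rhs => rw [← List.set_getElem_self (as := g.map (fun row => row.count 0))
      (by simpa using hn), List.sum_set]
  simp [hn]
  omega

-- marking a 0-cell strictly decreases the 0-count (cited by A's termination proof)
lemma pvCzSet2Lt (g : List (List Int)) (r c : Int) (h : pvGet2 g r c = some 0) :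
    pvCz (pvSet2 g r c 2) < pvCz g := by
  unfold pvGet2 at h
  cases hr : PySem.List.pyGet? g r with
  | none => rw [hr] at h; simp at h
  | some row =>
    rw [hr] at h
    simp only [Option.bind_some] at h
    obtain ⟨n, hn, hgn, hset, hgetd⟩ := pvIdxElim g r row hr
    obtain ⟨m, hm, hrm, hsetr, _⟩ := pvIdxElim row c 0 h
    have hrow : g[n] = row := (List.getElem?_eq_some_iff.mp hgn).2
    unfold pvSet2
    rw [hgetd, hsetr 2, hset]
    have haux := pvCzSetAux g n (row.set m 2) hn
    rw [hrow] at haux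
    have := pvCountSetTwoLt row m hrm
    omega

-- ===== PORT A =====
def pvMovesA : List (Int × Int) := [(1,0),(-1,0),(0,1),(0,-1)]

-- body of A's `for i, j in moves` loop (pushes onto the frontier / clears the flag)
def pvStepA (g : List (List Int)) (row col : Int)
    (st : List (Int × Int) × Bool) (m : Int × Int) : List (Int × Int) × Bool :=
  if row + m.1 < 0 ∨ (g.length : Int) ≤ row + m.1 then (st.1, false)
  else if col + m.2 < 0 ∨ ((PySem.List.pyGetD g (row + m.1) []).length : Int) ≤ col + m.2 then
    (st.1, false)
  else ((row + m.1, col + m.2) :: st.1, st.2)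

lemma pvFoldALen (g : List (List Int)) (row col : Int) :
    ∀ (ms : List (Int × Int)) (init : List (Int × Int) × Bool),
      (List.foldl (pvStepA g row col) init ms).1.length ≤ init.1.length + ms.length := by
  intro ms
  induction ms with
  | nil => intro init; simp
  | cons m rest ih =>
    intro init
    have h1 : (pvStepA g row col init m).1.length ≤ init.1.length + 1 := by
      unfold pvStepA; split_ifs <;> simp
    calc (List.foldl (pvStepA g row col) init (m :: rest)).1.length
        = (List.foldl (pvStepA g row col) (pvStepA g row col init m) rest).1.length := by simp
      _ ≤ (pvStepA g row col init m).1.length + rest.length := ih _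
      _ ≤ init.1.length + (m :: rest).length := by simp; omega

-- A's while-loop; the frontier stack is held head-as-top (Python appends/pops at the end).
-- `none` = the IndexError Python raises when the start cell is out of range.
def pvLoopA (g : List (List Int)) (frontier : List (Int × Int)) (surr : Bool) :
    Option (List (List Int) × Bool) :=
  match frontier with
  | [] => some (g, surr)
  | (row, col) :: rest =>
    match h : pvGet2 g row col with
    | none => none
    | some v =>
      if v ≠ 0 then pvLoopA g rest surr
      else
        let g' := pvSet2 g row col 2
        let st := pvMovesA.foldl (pvStepA g' row col) (rest, surr)
        pvLoopA g' st.1 st.2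
termination_by 4 * pvCz g + frontier.length
decreasing_by
  · simp only [List.length_cons]; omega
  · rename_i hv
    have hv0 : v = 0 := by simpa using hv
    rw [hv0] at h
    have hlt := pvCzSet2Lt g row col h
    have hlen := pvFoldALen (pvSet2 g row col 2) row col pvMovesA (rest, surr)
    have h4 : pvMovesA.length = 4 := rfl
    rw [h4] at hlen
    simp only [List.length_cons]
    simp at hlen ⊢
    omega

def checkIsClosed (grid : List (List Int)) (r : Int) (c : Int) : Bool :=
  match pvLoopA grid [(r, c)] true with
  | none => true          -- IndexError in Python (excluded by Pre_)
  | some p => p.2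

-- ===== PORT B =====
def pvMovesB : List (Int × Int) := [(0,-1),(0,1),(-1,0),(1,0)]

-- `0 <= nr < len(grid) and 0 <= nc < len(grid[nr])` in B
def pvInb (g : List (List Int)) (row col : Int) (m : Int × Int) : Bool :=
  !decide (row + m.1 < 0 ∨ (g.length : Int) ≤ row + m.1) &&
  !decide (col + m.2 < 0 ∨ ((PySem.List.pyGetD g (row + m.1) []).length : Int) ≤ col + m.2)

-- B's dfs: mark the cell, then fold the four moves, recursing into in-bounds 0-neighbours.
-- `fuel` only makes the recursion structural; `pvCz grid + 1` always suffices.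
mutual
def pvDfsB : Nat → List (List Int) → Int → Int → List (List Int) × Bool
  | 0, g, _, _ => (g, true)
  | (fuel+1), g, row, col => pvForB fuel (pvSet2 g row col 2) row col pvMovesB true
termination_by fuel _ _ _ => (fuel, 0)

def pvForB : Nat → List (List Int) → Int → Int → List (Int × Int) → Bool → List (List Int) × Bool
  | _, g, _, _, [], s => (g, s)
  | fuel, g, row, col, m :: rest, s =>
    if pvInb g row col m then
      if pvGet2 g (row + m.1) (col + m.2) = some 0 then
        let p := pvDfsB fuel g (row + m.1) (col + m.2)
        pvForB fuel p.1 row col rest (p.2 && s)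
      else pvForB fuel g row col rest s
    else pvForB fuel g row col rest false
termination_by fuel _ _ _ ms _ => (fuel, ms.length + 1)
end

def checkIsClosed_alt (grid : List (List Int)) (r : Int) (c : Int) : Bool :=
  match pvGet2 grid r c with
  | none => true          -- IndexError in Python (excluded by Pre_)
  | some v => if v ≠ 0 then true else (pvDfsB (pvCz grid + 1) grid r c).2

-- ===== PRECONDITION & SPEC =====
-- Pre_ excludes exactly the starts on which Python raises IndexError: grid[r][c] must exist
-- (Python's negative-index rule included).
def Pre_checkIsClosed (grid : List (List Int)) (r : Int) (c : Int) : Prop :=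
  PySem.Raise.InRange grid.length r ∧
  PySem.Raise.InRange (PySem.List.pyGetD grid r []).length c
instance (grid : List (List Int)) (r : Int) (c : Int) : Decidable (Pre_checkIsClosed grid r c) := by
  unfold Pre_checkIsClosed PySem.Raise.InRange; infer_instance

def pvWitness_checkIsClosed : List (List Int) × Int × Int := ([[0, 1], [1, 1]], 0, 0)

def Spec_checkIsClosed (grid : List (List Int)) (r : Int) (c : Int) (out : Bool) : Prop := out = checkIsClosed_alt grid r c
instance (grid : List (List Int)) (r : Int) (c : Int) (out : Bool) : Decidable (Spec_checkIsClosed grid r c out) := by unfold Spec_checkIsClosed; infer_instance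

-- ===== CLAIM (what is proved, stated in full; the proofs are below) =====
def Claim_equal_checkIsClosed : Prop := ∀ (grid : List (List Int)) (r : Int) (c : Int), Dom_checkIsClosed grid r c → Pre_checkIsClosed grid r c → Spec_checkIsClosed grid r c (checkIsClosed grid r c)

-- ===== LEMMAS AND PROOFS =====

lemma pvSetDNone {α : Type} (xs : List α) (i : Int) (v : α)
    (h : PySem.List.pyGet? xs i = none) : PySem.List.pySetD xs i v = xs := by
  unfold PySem.List.pyGet? at h
  unfold PySem.List.pySetD PySem.List.pySet?
  cases hidx : PySem.List.pyIdx? xs.length i with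
  | none => simp
  | some n =>
    rw [hidx] at h
    simp only [Option.bind_some] at h
    have hn := pvIdxLt _ _ _ hidx
    simp [List.getElem?_eq_getElem hn] at h

lemma pvCountSetTwoLe (row : List Int) (m : Nat) :
    ((row.set m 2).count 0 ≤ row.count 0) := by
  by_cases hm : m < row.length
  · rw [List.count_set hm]
    split_ifs <;> simp_all
  · rw [List.set_eq_of_length_le (by omega)]

-- marking any cell with 2 never increases the 0-count
lemma pvCzSet2Le (g : List (List Int)) (r c : Int) :
    pvCz (pvSet2 g r c 2) ≤ pvCz g := by
  unfold pvSet2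
  cases hr : PySem.List.pyGet? g r with
  | none => rw [pvSetDNone _ _ _ hr]
  | some row =>
    obtain ⟨n, hn, hgn, hset, hgetd⟩ := pvIdxElim g r row hr
    have hrow : g[n] = row := (List.getElem?_eq_some_iff.mp hgn).2
    rw [hgetd, hset]
    have hcount : (PySem.List.pySetD row c 2).count 0 ≤ row.count 0 := by
      unfold PySem.List.pySetD PySem.List.pySet?
      cases hc2 : PySem.List.pyIdx? row.length c with
      | none => simp
      | some m => simp only [Option.map_some, Option.getD_some]; exact pvCountSetTwoLe row m
    have haux := pvCzSetAux g n (PySem.List.pySetD row c 2) hn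
    rw [hrow] at haux
    omega


-- row lengths of a grid
def pvShape (g : List (List Int)) : List Nat := g.map List.length

lemma pvLenShape (g1 g2 : List (List Int)) (h : pvShape g1 = pvShape g2) :
    g1.length = g2.length := by
  have := congrArg List.length h
  simpa [pvShape] using this

lemma pvShapeSet2 (g : List (List Int)) (r c : Int) (v : Int) :
    pvShape (pvSet2 g r c v) = pvShape g := by
  unfold pvSet2
  cases hr : PySem.List.pyGet? g r with
  | none => rw [pvSetDNone _ _ _ hr]
  | some row =>
    obtain ⟨n, hn, hgn, hset, hgetd⟩ := pvIdxElim g r row hr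
    rw [hgetd, hset]
    unfold pvShape
    rw [List.map_set]
    have hlen : (PySem.List.pySetD row c v).length = (g.map List.length)[n]'(by simpa using hn) := by
      rw [PySem.List.length_pySetD]
      simp [(List.getElem?_eq_some_iff.mp hgn).2]
    rw [hlen, List.set_getElem_self]

lemma pvRowLenShape (g1 g2 : List (List Int)) (h : pvShape g1 = pvShape g2) (i : Int) :
    (PySem.List.pyGetD g1 i []).length = (PySem.List.pyGetD g2 i []).length := by
  have hl : g1.length = g2.length := pvLenShape _ _ h
  unfold PySem.List.pyGetD PySem.List.pyGet?
  rw [hl]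
  cases hidx : PySem.List.pyIdx? g2.length i with
  | none => simp
  | some n =>
    have hn : n < g2.length := pvIdxLt _ _ _ hidx
    have hn1 : n < g1.length := by omega
    have h2 := congrArg (fun (l : List Nat) => l[n]?) h
    simp only [pvShape, List.getElem?_map, List.getElem?_eq_getElem hn,
      List.getElem?_eq_getElem hn1, Option.map_some, Option.some.injEq] at h2
    simp [List.getElem?_eq_getElem hn, List.getElem?_eq_getElem hn1, h2]

lemma pvInbCongr (g1 g2 : List (List Int)) (h : pvShape g1 = pvShape g2) (row col : Int) :
    pvInb g1 row col = pvInb g2 row col := by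
  funext m
  unfold pvInb
  rw [pvLenShape _ _ h, pvRowLenShape _ _ h]

lemma pvShapeFor (fuel : Nat)
    (hD : ∀ g row col, pvShape (pvDfsB fuel g row col).1 = pvShape g) :
    ∀ (ms : List (Int × Int)) g (row col : Int) (s : Bool),
      pvShape (pvForB fuel g row col ms s).1 = pvShape g := by
  intro ms
  induction ms with
  | nil => intro g row col s; simp [pvForB]
  | cons m rest ih =>
    intro g row col s
    simp only [pvForB]
    split_ifs with h1 h2
    · rw [ih, hD]
    · exact ih ..
    · exact ih ..

lemma pvShapeDfs : ∀ (fuel : Nat) g (row col : Int),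
    pvShape (pvDfsB fuel g row col).1 = pvShape g := by
  intro fuel
  induction fuel with
  | zero => intro g row col; simp [pvDfsB]
  | succ f ih =>
    intro g row col
    simp only [pvDfsB]
    rw [pvShapeFor f ih, pvShapeSet2]

lemma pvCzFor (fuel : Nat)
    (hD : ∀ g row col, pvCz (pvDfsB fuel g row col).1 ≤ pvCz g) :
    ∀ (ms : List (Int × Int)) g (row col : Int) (s : Bool),
      pvCz (pvForB fuel g row col ms s).1 ≤ pvCz g := by
  intro ms
  induction ms with
  | nil => intro g row col s; simp [pvForB]
  | cons m rest ih =>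
    intro g row col s
    simp only [pvForB]
    split_ifs with h1 h2
    · exact le_trans (ih ..) (hD ..)
    · exact ih ..
    · exact ih ..

lemma pvCzDfs : ∀ (fuel : Nat) g (row col : Int),
    pvCz (pvDfsB fuel g row col).1 ≤ pvCz g := by
  intro fuel
  induction fuel with
  | zero => intro g row col; simp [pvDfsB]
  | succ f ih =>
    intro g row col
    simp only [pvDfsB]
    exact le_trans (pvCzFor f ih ..) (pvCzSet2Le ..)

-- in-bounds neighbour cell exists
lemma pvInbGet (g : List (List Int)) (row col : Int) (m : Int × Int)
    (h : pvInb g row col m = true) :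
    ∃ v, pvGet2 g (row + m.1) (col + m.2) = some v := by
  unfold pvInb at h
  simp only [Bool.and_eq_true, Bool.not_eq_eq_eq_not, Bool.not_true, decide_eq_false_iff_not,
    not_or, not_lt, not_le] at h
  obtain ⟨⟨h1, h2⟩, h3, h4⟩ := h
  unfold pvGet2
  rw [PySem.List.pyGet?_eq_some_getElem g h1 h2]
  simp only [Option.bind_some]
  have hrow : PySem.List.pyGetD g (row + m.1) [] = g[(row + m.1).toNat] :=
    PySem.List.pyGetD_eq_getElem g [] h1 h2
  rw [hrow] at h4
  rw [PySem.List.pyGet?_eq_some_getElem _ h3 h4]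
  exact ⟨_, rfl⟩

-- A's inner for-loop characterised: pushes the in-bounds neighbours (reversed) and ANDs the flag
lemma pvFoldAChar (g : List (List Int)) (row col : Int) :
    ∀ (ms : List (Int × Int)) (init : List (Int × Int) × Bool),
      List.foldl (pvStepA g row col) init ms =
        (((ms.filter (pvInb g row col)).reverse.map (fun m => (row + m.1, col + m.2))) ++ init.1,
         init.2 && ms.all (pvInb g row col)) := by
  intro ms
  induction ms with
  | nil => intro init; simp
  | cons m rest ih =>
    intro init
    rw [List.foldl_cons, ih]
    by_cases hib : pvInb g row col m = true
    · have hc : ¬(row + m.1 < 0 ∨ (g.length : Int) ≤ row + m.1) ∧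
          ¬(col + m.2 < 0 ∨ ((PySem.List.pyGetD g (row + m.1) []).length : Int) ≤ col + m.2) := by
        unfold pvInb at hib
        simp only [Bool.and_eq_true, Bool.not_eq_eq_eq_not, Bool.not_true,
          decide_eq_false_iff_not] at hib
        exact hib
      have hstep : pvStepA g row col init m = ((row + m.1, col + m.2) :: init.1, init.2) := by
        unfold pvStepA
        rw [if_neg hc.1, if_neg hc.2]
      rw [hstep]
      simp [hib, List.filter_cons_of_pos, List.map_append]
    · have hstep : pvStepA g row col init m = (init.1, false) := by
        unfold pvInb at hib
        simp only [Bool.and_eq_true, Bool.not_eq_eq_eq_not, Bool.not_true,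
          decide_eq_false_iff_not, not_and_or, not_not] at hib
        unfold pvStepA
        rcases hib with hib | hib
        · rw [if_pos hib]
        · by_cases hfst : row + m.1 < 0 ∨ (g.length : Int) ≤ row + m.1
          · rw [if_pos hfst]
          · rw [if_neg hfst, if_pos hib]
      rw [hstep]
      simp only [Bool.not_eq_true] at hib
      simp [hib, List.filter_cons_of_neg]

-- step-by-step forms of A's loop
lemma pvLoopA_nil (g : List (List Int)) (surr : Bool) :
    pvLoopA g [] surr = some (g, surr) := by
  rw [pvLoopA]

lemma pvLoopA_cons_none (g : List (List Int)) (row col : Int) (rest : List (Int × Int))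
    (surr : Bool) (h : pvGet2 g row col = none) :
    pvLoopA g ((row, col) :: rest) surr = none := by
  rw [pvLoopA]
  split <;> simp_all

lemma pvLoopA_cons_ne (g : List (List Int)) (row col : Int) (rest : List (Int × Int))
    (surr : Bool) (v : Int) (h : pvGet2 g row col = some v) (hv : v ≠ 0) :
    pvLoopA g ((row, col) :: rest) surr = pvLoopA g rest surr := by
  rw [pvLoopA]
  split <;> simp_all

lemma pvLoopA_cons_zero (g : List (List Int)) (row col : Int) (rest : List (Int × Int))
    (surr : Bool) (h : pvGet2 g row col = some 0) :
    pvLoopA g ((row, col) :: rest) surr =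
      pvLoopA (pvSet2 g row col 2)
        (((pvMovesA.filter (pvInb (pvSet2 g row col 2) row col)).reverse.map
            (fun m => (row + m.1, col + m.2))) ++ rest)
        (surr && pvMovesA.all (pvInb (pvSet2 g row col 2) row col)) := by
  rw [pvLoopA]
  split
  · simp_all
  · rename_i v heq
    rw [h] at heq
    have hv0 : v = 0 := by injection heq.symm
    subst hv0
    rw [if_neg (by simp)]
    show pvLoopA (pvSet2 g row col 2)
        (List.foldl (pvStepA (pvSet2 g row col 2) row col) (rest, surr) pvMovesA).1
        (List.foldl (pvStepA (pvSet2 g row col 2) row col) (rest, surr) pvMovesA).2 = _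
    rw [pvFoldAChar]

-- the stack loop splits at any point of the frontier
lemma pvLoopAAppend : ∀ (n : Nat) (g : List (List Int)) (fr1 fr2 : List (Int × Int)) (surr : Bool),
    4 * pvCz g + fr1.length ≤ n →
    pvLoopA g (fr1 ++ fr2) surr = (pvLoopA g fr1 surr).bind (fun p => pvLoopA p.1 fr2 p.2) := by
  intro n
  induction n with
  | zero =>
    intro g fr1 fr2 surr hle
    match fr1 with
    | [] => simp [pvLoopA_nil]
    | x :: rest => simp at hle
  | succ n ih =>
    intro g fr1 fr2 surr hle
    match fr1 with
    | [] => simp [pvLoopA_nil]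
    | (row, col) :: rest =>
      cases hv : pvGet2 g row col with
      | none => rw [List.cons_append, pvLoopA_cons_none _ _ _ _ _ hv,
          pvLoopA_cons_none _ _ _ _ _ hv]; rfl
      | some v =>
        by_cases hv0 : v = 0
        · subst hv0
          rw [List.cons_append, pvLoopA_cons_zero _ _ _ _ _ hv, pvLoopA_cons_zero _ _ _ _ _ hv]
          rw [← List.append_assoc]
          apply ih
          have hcz := pvCzSet2Lt g row col hv
          have hfil : ((pvMovesA.filter (pvInb (pvSet2 g row col 2) row col)).reverse.map
              (fun m => (row + m.1, col + m.2))).length ≤ 4 := by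
            simp only [List.length_map, List.length_reverse]
            have := List.length_filter_le (pvInb (pvSet2 g row col 2) row col) pvMovesA
            simpa using this
          simp only [List.length_append, List.length_cons] at hle ⊢
          omega
        · rw [List.cons_append, pvLoopA_cons_ne _ _ _ _ _ _ hv hv0,
            pvLoopA_cons_ne _ _ _ _ _ _ hv hv0]
          apply ih
          simp only [List.length_cons] at hle
          omega

-- the surrounded flag factors out of the loop
lemma pvLoopASurr : ∀ (n : Nat) (g : List (List Int)) (fr : List (Int × Int)) (s : Bool),
    4 * pvCz g + fr.length ≤ n →
    pvLoopA g fr s = (pvLoopA g fr true).map (fun p => (p.1, s && p.2)) := by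
  intro n
  induction n with
  | zero =>
    intro g fr s hle
    match fr with
    | [] => simp [pvLoopA_nil]
    | x :: rest => simp at hle
  | succ n ih =>
    intro g fr s hle
    match fr with
    | [] => simp [pvLoopA_nil]
    | (row, col) :: rest =>
      cases hv : pvGet2 g row col with
      | none => rw [pvLoopA_cons_none _ _ _ _ _ hv, pvLoopA_cons_none _ _ _ _ _ hv]; rfl
      | some v =>
        by_cases hv0 : v = 0
        · subst hv0
          rw [pvLoopA_cons_zero _ _ _ _ _ hv, pvLoopA_cons_zero _ _ _ _ _ hv]
          have hcz := pvCzSet2Lt g row col hv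
          have hfil : ((pvMovesA.filter (pvInb (pvSet2 g row col 2) row col)).reverse.map
              (fun m => (row + m.1, col + m.2))).length ≤ 4 := by
            simp only [List.length_map, List.length_reverse]
            have := List.length_filter_le (pvInb (pvSet2 g row col 2) row col) pvMovesA
            simpa using this
          have hm : 4 * pvCz (pvSet2 g row col 2) +
              (((pvMovesA.filter (pvInb (pvSet2 g row col 2) row col)).reverse.map
                (fun m => (row + m.1, col + m.2))) ++ rest).length ≤ n := by
            simp only [List.length_append, List.length_cons] at hle ⊢
            omega
          rw [ih _ _ _ hm, ih _ _ (true && pvMovesA.all (pvInb (pvSet2 g row col 2) row col)) hm]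
          cases hres : pvLoopA (pvSet2 g row col 2)
              (((pvMovesA.filter (pvInb (pvSet2 g row col 2) row col)).reverse.map
                (fun m => (row + m.1, col + m.2))) ++ rest) true with
          | none => rfl
          | some p =>
            simp only [Option.map_some]
            congr 1
            cases s <;> cases p.2 <;> cases pvMovesA.all (pvInb (pvSet2 g row col 2) row col) <;> rfl
        · rw [pvLoopA_cons_ne _ _ _ _ _ _ hv hv0, pvLoopA_cons_ne _ _ _ _ _ _ hv hv0]
          apply ih
          simp only [List.length_cons] at hle
          omega

lemma pvMovesRev : pvMovesA.reverse = pvMovesB := by decide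

lemma pvFilterConv (g : List (List Int)) (row col : Int) :
    (pvMovesA.filter (pvInb g row col)).reverse = pvMovesB.filter (pvInb g row col) := by
  rw [← pvMovesRev, List.filter_reverse]

lemma pvAllConv (g : List (List Int)) (row col : Int) :
    pvMovesA.all (pvInb g row col) = pvMovesB.all (pvInb g row col) := by
  rw [← pvMovesRev, List.all_reverse]

-- MAIN SIMULATION: running A's stack loop on the not-yet-pushed in-bounds neighbours of
-- (row,col) for the remaining moves ms equals B's move fold.
lemma pvSim : ∀ (fuel : Nat) (ms : List (Int × Int)) (row col : Int),
    ∀ (g : List (List Int)) (s : Bool), pvCz g ≤ fuel →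
    pvLoopA g ((ms.filter (pvInb g row col)).map (fun m => (row + m.1, col + m.2)))
      (s && ms.all (pvInb g row col)) =
    some (pvForB fuel g row col ms s) := by
  intro fuel
  induction fuel using Nat.strong_induction_on with
  | _ fuel IHf =>
    intro ms row col
    induction ms with
    | nil =>
      intro g s hcz
      simp [pvLoopA_nil, pvForB]
    | cons m rest ih =>
      intro g s hcz
      by_cases hib : pvInb g row col m = true
      · obtain ⟨v, hvcell⟩ := pvInbGet g row col m hib
        by_cases hv0 : v = 0
        · subst hv0
          -- A pops the 0-neighbour, marks it (= B's recursive dfs call)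
          have hczlt := pvCzSet2Lt g (row + m.1) (col + m.2) hvcell
          cases fuel with
          | zero => omega
          | succ f =>
            simp only [List.filter_cons_of_pos hib, List.map_cons, List.all_cons, hib,
              Bool.true_and]
            rw [pvLoopA_cons_zero _ _ _ _ _ hvcell]
            set g' := pvSet2 g (row + m.1) (col + m.2) 2 with hg'
            rw [pvFilterConv, pvAllConv]
            rw [pvLoopAAppend (4 * pvCz g' +
              ((pvMovesB.filter (pvInb g' (row + m.1) (col + m.2))).map
                (fun mm => (row + m.1 + mm.1, col + m.2 + mm.2))).length) g' _ _ _ (le_refl _)]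
            have hsim := IHf f (by omega) pvMovesB (row + m.1) (col + m.2) g' true (by omega)
            rw [Bool.true_and] at hsim
            have hsurr := pvLoopASurr (4 * pvCz g' +
              ((pvMovesB.filter (pvInb g' (row + m.1) (col + m.2))).map
                (fun mm => (row + m.1 + mm.1, col + m.2 + mm.2))).length) g'
              ((pvMovesB.filter (pvInb g' (row + m.1) (col + m.2))).map
                (fun mm => (row + m.1 + mm.1, col + m.2 + mm.2)))
            have hK := hsurr (pvMovesB.all (pvInb g' (row + m.1) (col + m.2))) (le_refl _)
            have hS := hsurr ((s && rest.all (pvInb g row col)) &&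
                pvMovesB.all (pvInb g' (row + m.1) (col + m.2))) (le_refl _)
            rw [hK] at hsim
            cases ht : pvLoopA g'
                ((pvMovesB.filter (pvInb g' (row + m.1) (col + m.2))).map
                  (fun mm => (row + m.1 + mm.1, col + m.2 + mm.2))) true with
            | none => rw [ht] at hsim; simp at hsim
            | some q =>
              rw [ht] at hsim
              simp only [Option.map_some, Option.some.injEq] at hsim
              rw [hS, ht]
              simp only [Option.map_some, Option.bind_some]
              -- B side
              have hdfs : pvDfsB (f + 1) g (row + m.1) (col + m.2) =
                  pvForB f g' (row + m.1) (col + m.2) pvMovesB true := by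
                simp [pvDfsB, hg']
              have hp : pvDfsB (f + 1) g (row + m.1) (col + m.2) = (q.1,
                  pvMovesB.all (pvInb g' (row + m.1) (col + m.2)) && q.2) := by
                rw [hdfs, ← hsim]
              have hshape : pvShape q.1 = pvShape g := by
                have h1 : pvShape (pvDfsB (f + 1) g (row + m.1) (col + m.2)).1 = pvShape g :=
                  pvShapeDfs ..
                rw [hp] at h1
                exact h1
              have hczq : pvCz q.1 ≤ f + 1 := by
                have h1 : pvCz (pvDfsB (f + 1) g (row + m.1) (col + m.2)).1 ≤ pvCz g :=
                  pvCzDfs ..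
                rw [hp] at h1
                simp only at h1
                omega
              have hinb : pvInb q.1 row col = pvInb g row col := pvInbCongr _ _ hshape row col
              simp only [pvForB, hib, hvcell, if_pos]
              rw [hp]
              simp only
              have hih := ih q.1 ((pvMovesB.all (pvInb g' (row + m.1) (col + m.2)) && q.2) && s)
                hczq
              rw [hinb] at hih
              rw [← hih]
              congr 1
              cases s <;> cases q.2 <;>
                cases hA : rest.all (pvInb g row col) <;>
                cases hB : pvMovesB.all (pvInb g' (row + m.1) (col + m.2)) <;> rfl
        · -- in-bounds neighbour that is not a 0-cell: A pops and skips it, B skips it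
          simp only [List.filter_cons_of_pos hib, List.map_cons, List.all_cons, hib,
            Bool.true_and]
          rw [pvLoopA_cons_ne _ _ _ _ _ _ hvcell hv0]
          rw [ih g s hcz]
          simp [pvForB, hib, hvcell, hv0]
      · -- out-of-bounds move: both clear the flag
        simp only [Bool.not_eq_true] at hib
        have hfil : List.filter (pvInb g row col) (m :: rest) = List.filter (pvInb g row col) rest := by
          simp [hib]
        have hall : (m :: rest).all (pvInb g row col) = false := by
          simp [List.all_cons, hib]
        rw [hfil, hall, Bool.and_false]
        have hih := ih g false hcz
        rw [Bool.false_and] at hih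
        rw [hih]
        have hrhs : pvForB fuel g row col (m :: rest) s = pvForB fuel g row col rest false := by
          simp [pvForB, hib]
        rw [hrhs]

-- ===== VERDICT (by name: the statement is the Claim_ definition above) =====
theorem checkIsClosed_spec : Claim_equal_checkIsClosed := by
  intro grid r c hdom hpre
  unfold Spec_checkIsClosed checkIsClosed checkIsClosed_alt
  obtain ⟨h1, h2⟩ := hpre
  have hrow : PySem.List.pyGet? grid r ≠ none :=
    fun hn => ((PySem.List.pyGet?_eq_none_iff _ _).mp hn) h1
  cases hr : PySem.List.pyGet? grid r with
  | none => exact absurd hr hrow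
  | some row =>
    obtain ⟨n, hn, hgn, hset, hgetd⟩ := pvIdxElim grid r row hr
    rw [hgetd] at h2
    have hcell : PySem.List.pyGet? row c ≠ none :=
      fun hn2 => ((PySem.List.pyGet?_eq_none_iff _ _).mp hn2) h2
    cases hc : PySem.List.pyGet? row c with
    | none => exact absurd hc hcell
    | some v =>
      have hv : pvGet2 grid r c = some v := by
        unfold pvGet2
        rw [hr]
        simpa using hc
      rw [hv]
      by_cases hv0 : v = 0
      · subst hv0
        rw [pvLoopA_cons_zero _ _ _ _ _ hv]
        rw [List.append_nil, pvFilterConv, pvAllConv]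
        have hcz := pvCzSet2Lt grid r c hv
        rw [pvSim (pvCz grid) pvMovesB r c (pvSet2 grid r c 2) true (by omega)]
        simp [pvDfsB]
      · rw [pvLoopA_cons_ne _ _ _ _ _ _ hv hv0, pvLoopA_nil]
        simp [hv0]
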